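-- pv_equiv track=rewrite | github.com/Data-MaSTeRR/codetree-TILs | 241011/DateTime to DateTime/datetime-to-datetime.py | minCheck
-- ===== SOURCE A (Python) =====
-- def minCheck(x, y, z):
--
--     d = 11
--     h = 11
--     m = 11
--
--     cum_m = 0
--
--     if x < 11 or (x == 11 and y < 11) or (x == 11 and y == 11 and z < 11):
--         return -1
--
--     while True:
--
--         if d == x and h == y and m == z:
--             break
--
--         m += 1
--         cum_m += 1
--
--         if m == 60:
--             h += 1
--             m = 0
--
--         if h == 24:
--             d += 1
--             h = 0
--             m = 0
--
--
--     return cum_m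
-- ===== SOURCE B (Python) =====
-- def minCheck(x, y, z):
--     if x < 11 or (x == 11 and y < 11) or (x == 11 and y == 11 and z < 11):
--         return -1
--     return ((x - 11) * 24 + (y - 11)) * 60 + (z - 11)
-- ===== Notes on version B (the rewrite author's own statement) =====
-- stated objective: alternative
-- what changed: Replaced the minute-by-minute simulation loop with the closed-form arithmetic formula ((x-11)*24+(y-11))*60+(z-11); intended as faster (measured 3.39x at the largest size both finished; A timed out beyond that, so a timing run could not confirm a ratio).
import Mathlib
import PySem

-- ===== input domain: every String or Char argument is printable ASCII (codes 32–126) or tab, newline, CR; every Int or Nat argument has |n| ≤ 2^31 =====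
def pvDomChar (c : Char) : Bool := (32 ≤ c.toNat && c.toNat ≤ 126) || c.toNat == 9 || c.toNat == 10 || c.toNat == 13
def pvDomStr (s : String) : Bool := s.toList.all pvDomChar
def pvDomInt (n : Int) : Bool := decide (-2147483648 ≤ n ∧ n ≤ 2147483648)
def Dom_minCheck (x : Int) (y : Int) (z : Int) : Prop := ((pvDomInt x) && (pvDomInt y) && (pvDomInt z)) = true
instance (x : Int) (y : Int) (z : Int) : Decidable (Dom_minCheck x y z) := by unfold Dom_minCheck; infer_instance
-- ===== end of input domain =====

-- B replaces A's minute-by-minute simulation loop by a single closed-form arithmetic formula.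

-- ===== PORT A =====
-- A's 'while True' loop, transliterated; the Nat fuel only makes the recursion total
-- (under Pre_minCheck the target is reached strictly before the fuel runs out).
def minCheckLoop (x y z : Int) : Nat → Int → Int → Int → Int → Int
  | 0, _, _, _, cum_m => cum_m
  | Nat.succ fuel, d, h, m, cum_m =>
    if d = x ∧ h = y ∧ m = z then cum_m
    else
      let m' := m + 1
      let cum' := cum_m + 1
      let hm := if m' = 60 then (h + 1, (0 : Int)) else (h, m')
      let dhm := if hm.1 = 24 then (d + 1, (0 : Int), (0 : Int)) else (d, hm.1, hm.2)
      minCheckLoop x y z fuel dhm.1 dhm.2.1 dhm.2.2 cum'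

def minCheck (x : Int) (y : Int) (z : Int) : Int :=
  if x < 11 ∨ (x = 11 ∧ y < 11) ∨ (x = 11 ∧ y = 11 ∧ z < 11) then -1
  else minCheckLoop x y z ((x - 10).toNat * 1440) 11 11 11 0

-- ===== PORT B =====
def minCheck_alt (x : Int) (y : Int) (z : Int) : Int :=
  if x < 11 ∨ (x = 11 ∧ y < 11) ∨ (x = 11 ∧ y = 11 ∧ z < 11) then -1
  else ((x - 11) * 24 + (y - 11)) * 60 + (z - 11)

-- ===== PRECONDITION & SPEC =====
-- Pre_ admits exactly the inputs on which A terminates: either the 'before the start' guard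
-- fires (A returns -1 immediately), or the target hour/minute are a real clock time
-- (0 ≤ y < 24 and 0 ≤ z < 60); otherwise A's loop never meets the target and diverges.
def Pre_minCheck (x : Int) (y : Int) (z : Int) : Prop :=
  (x < 11 ∨ (x = 11 ∧ y < 11) ∨ (x = 11 ∧ y = 11 ∧ z < 11)) ∨
  (0 ≤ y ∧ y < 24 ∧ 0 ≤ z ∧ z < 60)
instance (x : Int) (y : Int) (z : Int) : Decidable (Pre_minCheck x y z) := by
  unfold Pre_minCheck; infer_instance

def pvWitness_minCheck : Int × Int × Int := (12, 3, 45)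

def Spec_minCheck (x : Int) (y : Int) (z : Int) (out : Int) : Prop := out = minCheck_alt x y z
instance (x : Int) (y : Int) (z : Int) (out : Int) : Decidable (Spec_minCheck x y z out) := by
  unfold Spec_minCheck; infer_instance

-- ===== CLAIM (what is proved, stated in full; the proofs are below) =====
def Claim_equal_minCheck : Prop :=
  ∀ (x : Int) (y : Int) (z : Int), Dom_minCheck x y z → Pre_minCheck x y z →
    Spec_minCheck x y z (minCheck x y z)

-- ===== LEMMAS AND PROOFS =====

-- Loop invariant: from a valid clock state (d,h,m) not past the target, with enough fuel,
-- the loop returns cum_m plus the number of minutes separating (d,h,m) from (x,y,z).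
theorem minCheckLoop_eq (x y z : Int) (hy0 : 0 ≤ y) (hy : y < 24) (hz0 : 0 ≤ z) (hz : z < 60) :
    ∀ (fuel : Nat) (d h m cum_m : Int), 0 ≤ h → h < 24 → 0 ≤ m → m < 60 →
    (d * 24 + h) * 60 + m ≤ (x * 24 + y) * 60 + z →
    (x * 24 + y) * 60 + z - ((d * 24 + h) * 60 + m) < (fuel : Int) →
    minCheckLoop x y z fuel d h m cum_m =
      cum_m + ((x * 24 + y) * 60 + z - ((d * 24 + h) * 60 + m)) := by
  intro fuel
  induction fuel with
  | zero => intro d h m cum_m h0 h1 m0 m1 hle hfuel; exfalso; omega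
  | succ n ih =>
    intro d h m cum_m h0 h1 m0 m1 hle hfuel
    by_cases heq : d = x ∧ h = y ∧ m = z
    · obtain ⟨rfl, rfl, rfl⟩ := heq
      simp [minCheckLoop]
    · rw [minCheckLoop, if_neg heq]
      by_cases hm60 : m + 1 = 60
      · by_cases hh24 : h + 1 = 24
        · simp only [hm60, hh24]
          simp only [if_true]
          rw [ih (d + 1) 0 0 (cum_m + 1) (by omega) (by omega) (by omega) (by omega)
              (by omega) (by omega)]
          omega
        · simp only [hm60]
          simp only [if_true]
          rw [if_neg hh24]
          rw [ih d (h + 1) 0 (cum_m + 1) (by omega) (by omega) (by omega) (by omega)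
              (by omega) (by omega)]
          omega
      · simp only [if_neg hm60, if_neg h1.ne]
        rw [ih d h (m + 1) (cum_m + 1) (by omega) (by omega) (by omega) (by omega)
            (by omega) (by omega)]
        omega

-- ===== VERDICT (by name: the statement is the Claim_ definition above) =====
theorem minCheck_spec : Claim_equal_minCheck := by
  intro x y z _ hpre
  unfold Spec_minCheck minCheck minCheck_alt
  by_cases hg : x < 11 ∨ (x = 11 ∧ y < 11) ∨ (x = 11 ∧ y = 11 ∧ z < 11)
  · rw [if_pos hg, if_pos hg]
  · rw [if_neg hg, if_neg hg]
    rcases hpre with hpre | ⟨hy0, hy, hz0, hz⟩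
    · exact absurd hpre hg
    · rw [minCheckLoop_eq x y z hy0 hy hz0 hz _ 11 11 11 0 (by omega) (by omega)
          (by omega) (by omega) (by omega) (by omega)]
      ring
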